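-- pv_equiv track=rewrite | github.com/dagoaty/AdventofCode2021 | day4/day4.py | getCardWinningPos
-- ===== SOURCE A (Python) =====
-- from typing import List, Tuple, Set
--
-- def getNumPos(num: int, callLine: List[int]) -> int:
--     pos: int = 0
--     for call in callLine:
--         if call == num:
--             return pos
--         pos += 1
--     return pos
--
-- def getCardWinningPos(card: List[List[int]], callLine: List[int]) -> int:
--     cardWinPos: int = len(callLine)
--     for line in card:
--         lineWinPos: int = 0
--         for num in line:
--             numPos = getNumPos(num, callLine)
--             if numPos > lineWinPos:
--                 lineWinPos = numPos
--         if lineWinPos < cardWinPos: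
--             cardWinPos = lineWinPos
--     return cardWinPos
-- ===== SOURCE B (Python) =====
-- from typing import List
--
-- def getCardWinningPos(card: List[List[int]], callLine: List[int]) -> int:
--     total = len(callLine)
--
--     def rowVal(line: List[int]) -> int:
--         need = set(line)
--         if not need:
--             return 0
--         for i, n in enumerate(callLine):
--             need.discard(n)
--             if not need:
--                 return i
--         return total
--
--     return min(map(rowVal, card), default=total)
-- ===== Notes on version B (the rewrite author's own statement) =====
-- stated objective: faster
-- what changed: Instead of searching callLine once per card number and maxing the found indices, B scans callLine once per row while discarding called numbers from the row's remaining set, returning the index at which the set empties; the card minimum is a min over the mapped row values with a default.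
import Mathlib
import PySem

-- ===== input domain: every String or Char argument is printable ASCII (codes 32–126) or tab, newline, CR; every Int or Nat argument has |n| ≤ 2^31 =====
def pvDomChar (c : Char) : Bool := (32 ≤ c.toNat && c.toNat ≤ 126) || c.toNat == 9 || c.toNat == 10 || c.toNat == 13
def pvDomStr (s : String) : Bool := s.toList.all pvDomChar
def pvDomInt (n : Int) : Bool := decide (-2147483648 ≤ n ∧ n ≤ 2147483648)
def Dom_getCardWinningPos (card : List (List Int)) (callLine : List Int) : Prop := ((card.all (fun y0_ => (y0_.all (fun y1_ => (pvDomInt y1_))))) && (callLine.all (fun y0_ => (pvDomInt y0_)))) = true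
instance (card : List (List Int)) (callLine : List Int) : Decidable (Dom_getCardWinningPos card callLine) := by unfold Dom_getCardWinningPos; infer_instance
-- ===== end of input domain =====

-- B scans callLine once per row, removing called numbers from the row's remaining set,
-- instead of A's per-number search of callLine; objective: faster (fewer passes over callLine).

-- ===== PORT A =====
-- getNumPos: linear search of callLine with a position counter (returns final pos = len on a miss)
def pvGetNumPosGo (num : Int) (cs : List Int) (pos : Int) : Int :=
  match cs with
  | [] => pos
  | c :: r => if c = num then pos else pvGetNumPosGo num r (pos + 1)

def pvGetNumPos (num : Int) (callLine : List Int) : Int :=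
  pvGetNumPosGo num callLine 0

-- Python's locals numPos/lineWinPos are inlined in the fold steps (getNumPos is pure)
def getCardWinningPos (card : List (List Int)) (callLine : List Int) : Int :=
  card.foldl
    (fun cardWinPos line =>
      let lineWinPos :=
        line.foldl
          (fun lw num => if pvGetNumPos num callLine > lw then pvGetNumPos num callLine else lw) 0
      if lineWinPos < cardWinPos then lineWinPos else cardWinPos)
    (callLine.length : Int)

-- ===== PORT B =====
-- the 'for i, n in enumerate(callLine)' loop of rowVal: discard n, return i when the set
-- empties, total when the loop runs out (Python's local need is threaded as the argument)
def pvRowLoop (total : Int) (need : PySem.Set Int) (cs : List Int) (i : Int) : Int :=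
  match cs with
  | [] => total
  | c :: rest =>
    if PySem.Set.discard need c = [] then i
    else pvRowLoop total (PySem.Set.discard need c) rest (i + 1)

def pvRowVal (total : Int) (callLine : List Int) (line : List Int) : Int :=
  if PySem.Set.ofList line = [] then 0
  else pvRowLoop total (PySem.Set.ofList line) callLine 0

def getCardWinningPos_alt (card : List (List Int)) (callLine : List Int) : Int :=
  (PySem.List.min? (card.map (pvRowVal (callLine.length : Int) callLine)) (fun x => x)).getD
    (callLine.length : Int)

-- ===== PRECONDITION & SPEC =====
def Spec_getCardWinningPos (card : List (List Int)) (callLine : List Int) (out : Int) : Prop := out = getCardWinningPos_alt card callLine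
instance (card : List (List Int)) (callLine : List Int) (out : Int) : Decidable (Spec_getCardWinningPos card callLine out) := by unfold Spec_getCardWinningPos; infer_instance

-- ===== CLAIM (what is proved, stated in full; the proofs are below) =====
def Claim_equal_getCardWinningPos : Prop := ∀ (card : List (List Int)) (callLine : List Int), Dom_getCardWinningPos card callLine → Spec_getCardWinningPos card callLine (getCardWinningPos card callLine)

-- ===== LEMMAS AND PROOFS =====

-- the running-max loop shape shared by A's inner fold and the analysis of B's set loop
def pvFmax (g : Int → Int) (i : Int) (l : List Int) : Int :=
  l.foldl (fun a n => if g n > a then g n else a) i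

theorem pvFmax_cons (g : Int → Int) (i : Int) (c : Int) (t : List Int) :
    pvFmax g i (c :: t) = pvFmax g (if g c > i then g c else i) t := rfl

theorem pvFmax_ge_init (g : Int → Int) (i : Int) (l : List Int) : i ≤ pvFmax g i l := by
  induction l generalizing i with
  | nil => simp [pvFmax]
  | cons c t ih =>
    rw [pvFmax_cons]
    refine le_trans ?_ (ih (if g c > i then g c else i))
    split <;> omega

theorem pvFmax_ge_mem (g : Int → Int) (i : Int) (l : List Int) (n : Int) (hn : n ∈ l) :
    g n ≤ pvFmax g i l := by
  induction l generalizing i with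
  | nil => simp at hn
  | cons c t ih =>
    rw [pvFmax_cons]
    rcases List.mem_cons.mp hn with h | h
    · subst h
      refine le_trans ?_ (pvFmax_ge_init g _ t)
      split <;> omega
    · exact ih _ h

theorem pvFmax_le (g : Int → Int) (i r : Int) (l : List Int)
    (hi : i ≤ r) (h : ∀ n ∈ l, g n ≤ r) : pvFmax g i l ≤ r := by
  induction l generalizing i with
  | nil => simpa [pvFmax] using hi
  | cons c t ih =>
    rw [pvFmax_cons]
    have hc := h c (by simp)
    have hstep : (if g c > i then g c else i) ≤ r := by split <;> omega
    exact ih _ hstep (fun n hn => h n (List.mem_cons_of_mem _ hn))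

theorem pvFmax_congr (g : Int → Int) (i : Int) (l₁ l₂ : List Int)
    (h : ∀ x, x ∈ l₁ ↔ x ∈ l₂) : pvFmax g i l₁ = pvFmax g i l₂ := by
  refine le_antisymm ?_ ?_
  · exact pvFmax_le g i _ l₁ (pvFmax_ge_init g i l₂)
      (fun n hn => pvFmax_ge_mem g i l₂ n ((h n).mp hn))
  · exact pvFmax_le g i _ l₂ (pvFmax_ge_init g i l₁)
      (fun n hn => pvFmax_ge_mem g i l₁ n ((h n).mpr hn))

-- facts about A's getNumPos
theorem pvGo_shift (num : Int) (cs : List Int) (pos : Int) :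
    pvGetNumPosGo num cs pos = pos + pvGetNumPosGo num cs 0 := by
  induction cs generalizing pos with
  | nil => simp [pvGetNumPosGo]
  | cons c r ih =>
    simp only [pvGetNumPosGo]
    by_cases h : c = num
    · simp [h]
    · simp only [h, if_false]
      rw [ih (pos + 1), ih (0 + 1)]; ring

theorem pvGetNumPos_cons (n c : Int) (rest : List Int) :
    pvGetNumPos n (c :: rest) = if c = n then 0 else 1 + pvGetNumPos n rest := by
  simp only [pvGetNumPos, pvGetNumPosGo]
  by_cases h : c = n
  · simp [h]
  · simp only [h, if_false]
    exact pvGo_shift n rest (0 + 1)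

theorem pvGetNumPos_nonneg (n : Int) (cs : List Int) : 0 ≤ pvGetNumPos n cs := by
  induction cs with
  | nil => simp [pvGetNumPos, pvGetNumPosGo]
  | cons c r ih =>
    rw [pvGetNumPos_cons]
    split <;> omega

theorem pvGetNumPos_le_len (n : Int) (cs : List Int) : pvGetNumPos n cs ≤ cs.length := by
  induction cs with
  | nil => simp [pvGetNumPos, pvGetNumPosGo]
  | cons c r ih =>
    rw [pvGetNumPos_cons]
    simp only [List.length_cons]
    split <;> [push_cast; push_cast] <;> omega

theorem pvGetNumPos_of_not_mem (n : Int) (cs : List Int) (h : n ∉ cs) :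
    pvGetNumPos n cs = cs.length := by
  induction cs with
  | nil => simp [pvGetNumPos, pvGetNumPosGo]
  | cons c r ih =>
    rw [pvGetNumPos_cons]
    have hcn : c ≠ n := fun hc => h (by simp [hc])
    have hr : n ∉ r := fun hr => h (List.mem_cons_of_mem _ hr)
    simp [hcn, ih hr]
    ring

-- membership in Set.discard (discard is a filter)
theorem pv_mem_discard (s : PySem.Set Int) (c x : Int) :
    x ∈ PySem.Set.discard s c ↔ x ∈ s ∧ x ≠ c := by
  simp [PySem.Set.discard, List.mem_filter]

theorem pv_discard_ne_nil (s : PySem.Set Int) (c : Int) (h : PySem.Set.discard s c ≠ []) :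
    ∃ x ∈ s, x ≠ c := by
  rcases List.exists_mem_of_ne_nil _ h with ⟨x, hx⟩
  rcases (pv_mem_discard s c x).mp hx with ⟨h1, h2⟩
  exact ⟨x, h1, h2⟩

-- B's per-row scan equals the max of first indices relative to the remaining call list,
-- when every needed number occurs there, and total otherwise
theorem pvRowLoop_eq (cs : List Int) (total : Int) (S : PySem.Set Int) (i : Int)
    (hS : S ≠ []) :
    pvRowLoop total S cs i =
      if ∀ n ∈ S, n ∈ cs then i + pvFmax (fun n => pvGetNumPos n cs) 0 S else total := by
  induction cs generalizing S i with
  | nil =>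
    rcases List.exists_mem_of_ne_nil _ hS with ⟨x, hx⟩
    have hnot : ¬ (∀ n ∈ S, n ∈ ([] : List Int)) :=
      fun h => absurd (h x hx) (List.not_mem_nil)
    simp only [pvRowLoop]
    rw [if_neg hnot]
  | cons c rest ih =>
    simp only [pvRowLoop]
    by_cases hE : PySem.Set.discard S c = []
    · -- every element of S equals c: the row completes now, max index 0
      have hall : ∀ n ∈ S, n = c := by
        intro n hn
        by_contra hne
        exact (List.ne_nil_of_mem ((pv_mem_discard S c n).mpr ⟨hn, hne⟩)) hE
      have hmem : ∀ n ∈ S, n ∈ c :: rest := fun n hn => by simp [hall n hn]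
      have hM : pvFmax (fun n => pvGetNumPos n (c :: rest)) 0 S = 0 := by
        refine le_antisymm ?_ (pvFmax_ge_init _ 0 S)
        refine pvFmax_le _ 0 0 S le_rfl ?_
        intro n hn
        have : pvGetNumPos n (c :: rest) = 0 := by
          rw [pvGetNumPos_cons, if_pos (hall n hn).symm]
        omega
      rw [if_pos hE, if_pos hmem, hM]
      omega
    · rw [if_neg hE, ih _ _ hE]
      have hiff : (∀ n ∈ PySem.Set.discard S c, n ∈ rest) ↔ (∀ n ∈ S, n ∈ c :: rest) := by
        constructor
        · intro h n hn
          by_cases hnc : n = c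
          · simp [hnc]
          · exact List.mem_cons_of_mem _ (h n ((pv_mem_discard S c n).mpr ⟨hn, hnc⟩))
        · intro h n hn
          rcases (pv_mem_discard S c n).mp hn with ⟨h1, h2⟩
          rcases List.mem_cons.mp (h n h1) with hc | hr
          · exact absurd hc h2
          · exact hr
      by_cases hAll : ∀ n ∈ S, n ∈ c :: rest
      · rw [if_pos (hiff.mpr hAll), if_pos hAll]
        rcases pv_discard_ne_nil S c hE with ⟨n₀, hn₀S, hn₀c⟩
        have hn₀S' : n₀ ∈ PySem.Set.discard S c := (pv_mem_discard S c n₀).mpr ⟨hn₀S, hn₀c⟩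
        have hM : pvFmax (fun n => pvGetNumPos n (c :: rest)) 0 S =
            1 + pvFmax (fun n => pvGetNumPos n rest) 0 (PySem.Set.discard S c) := by
          refine le_antisymm ?_ ?_
          · refine pvFmax_le _ 0 _ S ?_ ?_
            · have := pvFmax_ge_init (fun n => pvGetNumPos n rest) 0 (PySem.Set.discard S c)
              omega
            · intro n hn
              have hcons := pvGetNumPos_cons n c rest
              by_cases hnc : c = n
              · rw [hcons, if_pos hnc]
                have := pvFmax_ge_init (fun n => pvGetNumPos n rest) 0 (PySem.Set.discard S c)
                omega
              · have hn' : n ∈ PySem.Set.discard S c :=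
                  (pv_mem_discard S c n).mpr ⟨hn, fun he => hnc he.symm⟩
                have hb := pvFmax_ge_mem (fun n => pvGetNumPos n rest) 0 _ n hn'
                beta_reduce at hb
                rw [hcons, if_neg hnc]
                omega
          · have h1 : 1 ≤ pvFmax (fun n => pvGetNumPos n (c :: rest)) 0 S := by
              have hb := pvFmax_ge_mem (fun n => pvGetNumPos n (c :: rest)) 0 S n₀ hn₀S
              beta_reduce at hb
              rw [pvGetNumPos_cons, if_neg (fun h => hn₀c h.symm)] at hb
              have hnn := pvGetNumPos_nonneg n₀ rest
              omega
            have h2 : pvFmax (fun n => pvGetNumPos n rest) 0 (PySem.Set.discard S c) ≤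
                pvFmax (fun n => pvGetNumPos n (c :: rest)) 0 S - 1 := by
              refine pvFmax_le _ 0 _ _ (by omega) ?_
              intro n hn
              rcases (pv_mem_discard S c n).mp hn with ⟨hnS, hnc⟩
              have hb := pvFmax_ge_mem (fun n => pvGetNumPos n (c :: rest)) 0 S n hnS
              beta_reduce at hb
              rw [pvGetNumPos_cons, if_neg (fun h => hnc h.symm)] at hb
              omega
            omega
        rw [hM]; ring
      · rw [if_neg (fun h => hAll (hiff.mp h)), if_neg hAll]

-- A's inner fold over a row equals B's rowVal
theorem pvRow_eq (callLine line : List Int) :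
    pvFmax (fun n => pvGetNumPos n callLine) 0 line =
      pvRowVal (callLine.length : Int) callLine line := by
  by_cases hSnil : PySem.Set.ofList line = []
  · have hlnil : line = [] := by
      rcases line with _ | ⟨x, t⟩
      · rfl
      · exact absurd hSnil
          (List.ne_nil_of_mem ((PySem.Set.mem_ofList (x :: t) x).mpr (by simp)))
    subst hlnil
    simp [pvRowVal, pvFmax, PySem.Set.ofList]
  · have hcongr := pvFmax_congr (fun n => pvGetNumPos n callLine) 0 line
      (PySem.Set.ofList line) (fun y => (PySem.Set.mem_ofList line y).symm)
    rw [hcongr]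
    simp only [pvRowVal]
    rw [if_neg hSnil, pvRowLoop_eq callLine _ _ 0 hSnil]
    by_cases hAll : ∀ n ∈ (PySem.Set.ofList line : List Int), n ∈ callLine
    · rw [if_pos hAll]; ring
    · rw [if_neg hAll]
      push Not at hAll
      rcases hAll with ⟨n, hnS, hnc⟩
      refine le_antisymm ?_ ?_
      · refine pvFmax_le _ 0 _ _ ?_ ?_
        · exact_mod_cast Int.natCast_nonneg _
        · intro m _; exact pvGetNumPos_le_len m callLine
      · have hb := pvFmax_ge_mem (fun n => pvGetNumPos n callLine) 0 _ n hnS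
        beta_reduce at hb
        rw [pvGetNumPos_of_not_mem n callLine hnc] at hb
        exact hb

-- the outer min loop: A's running strict-min fold = Python min(..., default=total)
theorem pvMin_eq (vs : List Int) (total : Int) (hle : ∀ v ∈ vs, v ≤ total) :
    vs.foldl (fun a v => if v < a then v else a) total =
      (PySem.List.min? vs (fun x => x)).getD total := by
  rcases vs with _ | ⟨x, t⟩
  · simp [PySem.List.min?]
  · rw [PySem.List.min?_id_cons]
    have hstep : (fun (a v : Int) => if v < a then v else a) = fun a v => min a v := by
      funext a v
      rcases lt_or_ge v a with h | h
      · rw [if_pos h, min_eq_right (le_of_lt h)]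
      · rw [if_neg (not_lt.mpr h), min_eq_left h]
    rw [hstep]
    simp only [List.foldl_cons, Option.getD_some]
    rw [min_eq_right (hle x (by simp))]

-- ===== VERDICT (by name: the statement is the Claim_ definition above) =====
theorem getCardWinningPos_spec : Claim_equal_getCardWinningPos := by
  intro card callLine _
  unfold Spec_getCardWinningPos getCardWinningPos getCardWinningPos_alt
  have hmap : card.foldl
      (fun cardWinPos line =>
        let lineWinPos :=
          line.foldl
            (fun lw num => if pvGetNumPos num callLine > lw then pvGetNumPos num callLine else lw) 0
        if lineWinPos < cardWinPos then lineWinPos else cardWinPos)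
      (callLine.length : Int) =
      (card.map (pvRowVal (callLine.length : Int) callLine)).foldl
        (fun a v => if v < a then v else a) (callLine.length : Int) := by
    rw [List.foldl_map]
    congr 1
    funext a line
    show (if pvFmax (fun n => pvGetNumPos n callLine) 0 line < a
          then pvFmax (fun n => pvGetNumPos n callLine) 0 line else a) = _
    rw [pvRow_eq callLine line]
  rw [hmap]
  refine pvMin_eq _ _ ?_
  intro v hv
  rcases List.mem_map.mp hv with ⟨line, _, hline⟩
  rw [← hline, ← pvRow_eq]
  refine pvFmax_le _ 0 _ _ (by exact_mod_cast Int.natCast_nonneg _) ?_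
  intro n _
  exact pvGetNumPos_le_len n callLine
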